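-- pv_equiv track=rewrite | github.com/misong2002/miki-frontend | api/memory/memory_runtime.py | _extract_time_bounds
-- ===== SOURCE A (Python) =====
-- from typing import Any, Dict, List, Optional
--
-- def _extract_time_bounds(messages: List[Dict[str, Any]]) -> tuple[int, int]:
--     times = []
--     for msg in messages or []:
--         ts = msg.get("createdAt") or msg.get("created_at")
--         if isinstance(ts, (int, float)):
--             times.append(int(ts))
--
--     if not times:
--         return 0, 0
--
--     return min(times), max(times)
-- ===== SOURCE B (Python) =====
-- def _extract_time_bounds(messages):
--     lo = None
--     hi = None
--     for msg in messages or []: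
--         ts = msg.get("createdAt") or msg.get("created_at")
--         if isinstance(ts, (int, float)):
--             v = int(ts)
--             if lo is None or v < lo:
--                 lo = v
--             if hi is None or v > hi:
--                 hi = v
--     if lo is None:
--         return 0, 0
--     return lo, hi
-- ===== Notes on version B (the rewrite author's own statement) =====
-- stated objective: simpler
-- what changed: Replaces the build-a-list-then-min-then-max three-pass structure with a single pass that maintains running lo/hi accumulators and builds no intermediate list.
import Mathlib
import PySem

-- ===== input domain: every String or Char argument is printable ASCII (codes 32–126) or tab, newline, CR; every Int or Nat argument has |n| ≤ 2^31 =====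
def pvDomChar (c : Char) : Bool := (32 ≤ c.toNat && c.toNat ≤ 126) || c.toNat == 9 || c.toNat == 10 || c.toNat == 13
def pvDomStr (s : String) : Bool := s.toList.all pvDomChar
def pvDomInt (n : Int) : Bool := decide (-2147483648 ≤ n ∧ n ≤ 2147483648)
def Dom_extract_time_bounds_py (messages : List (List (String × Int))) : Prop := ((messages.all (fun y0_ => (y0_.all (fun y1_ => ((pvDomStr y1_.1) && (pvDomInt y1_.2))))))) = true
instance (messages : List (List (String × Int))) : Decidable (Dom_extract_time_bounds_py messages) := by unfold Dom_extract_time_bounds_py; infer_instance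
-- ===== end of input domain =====

-- B replaces A's build-a-list-then-min-then-max three passes by one pass with running lo/hi accumulators (objective: simpler).

-- ===== PORT A =====
-- ts = msg.get("createdAt") or msg.get("created_at")  (a 0 'createdAt' is falsy and falls through)
def pvTsA (msg : List (String × Int)) : Option Int :=
  match (PySem.Dict.mk msg).get? "createdAt" with
  | some v => if v ≠ 0 then some v else (PySem.Dict.mk msg).get? "created_at"
  | none => (PySem.Dict.mk msg).get? "created_at"

def extract_time_bounds_py (messages : List (List (String × Int))) : Int × Int :=
  let times := messages.foldl (fun acc msg =>
    match pvTsA msg with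
    | some v => acc ++ [v]   -- times.append(int(ts)); values already ints
    | none => acc) []
  if times.isEmpty then (0, 0)
  else
    match PySem.List.min? times (fun x => x), PySem.List.max? times (fun x => x) with
    | some a, some b => (a, b)
    | _, _ => (0, 0)

-- ===== PORT B =====
def pvTsB (msg : List (String × Int)) : Option Int :=
  let a := (PySem.Dict.mk msg).get? "createdAt"
  if a.getD 0 ≠ 0 then a else (PySem.Dict.mk msg).get? "created_at"

def extract_time_bounds_py_alt (messages : List (List (String × Int))) : Int × Int :=
  let st := messages.foldl (fun (p : Option Int × Option Int) msg =>
    (pvTsB msg).elim p (fun v =>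
      ((p.1).elim (some v) (fun l => some (if v < l then v else l)),
       (p.2).elim (some v) (fun h => some (if v > h then v else h))))) (none, none)
  -- 'if lo is None: return 0, 0' then 'return lo, hi'; hi is always set when lo is, so getD 0 only totalizes
  (st.1).elim (0, 0) (fun l => (l, (st.2).getD 0))

-- ===== PRECONDITION & SPEC =====
def Spec_extract_time_bounds_py (messages : List (List (String × Int))) (out : Int × Int) : Prop := out = extract_time_bounds_py_alt messages
instance (messages : List (List (String × Int))) (out : Int × Int) : Decidable (Spec_extract_time_bounds_py messages out) := by unfold Spec_extract_time_bounds_py; infer_instance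

-- ===== CLAIM (what is proved, stated in full; the proofs are below) =====
def Claim_equal_extract_time_bounds_py : Prop := ∀ (messages : List (List (String × Int))), Dom_extract_time_bounds_py messages → Spec_extract_time_bounds_py messages (extract_time_bounds_py messages)

-- ===== LEMMAS AND PROOFS =====

-- running min/max of a list, as an Option
def pvM? (xs : List Int) : Option Int :=
  match xs with
  | [] => none
  | x :: t => some (t.foldl min x)

def pvX? (xs : List Int) : Option Int :=
  match xs with
  | [] => none
  | x :: t => some (t.foldl max x)

theorem pvM?_snoc (acc : List Int) (v : Int) :
    pvM? (acc ++ [v]) = (pvM? acc).elim (some v) (fun l => some (if v < l then v else l)) := by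
  cases acc with
  | nil => simp [pvM?]
  | cons x t =>
    simp only [pvM?, List.cons_append, List.foldl_append, List.foldl_cons, List.foldl_nil, Option.elim, Option.some.injEq]
    simp only [min_def]
    split_ifs <;> omega

theorem pvX?_snoc (acc : List Int) (v : Int) :
    pvX? (acc ++ [v]) = (pvX? acc).elim (some v) (fun h => some (if v > h then v else h)) := by
  cases acc with
  | nil => simp [pvX?]
  | cons x t =>
    simp only [pvX?, List.cons_append, List.foldl_append, List.foldl_cons, List.foldl_nil, Option.elim, Option.some.injEq]
    simp only [max_def]
    split_ifs <;> omega

-- the single-pass fold carries exactly (running min, running max) of A's collected list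
theorem pv_fold_inv (messages : List (List (String × Int))) (acc : List Int) :
    messages.foldl (fun (p : Option Int × Option Int) msg =>
      (pvTsB msg).elim p (fun v =>
        ((p.1).elim (some v) (fun l => some (if v < l then v else l)),
         (p.2).elim (some v) (fun h => some (if v > h then v else h))))) (pvM? acc, pvX? acc)
    = (pvM? (messages.foldl (fun acc msg =>
        match pvTsA msg with
        | some v => acc ++ [v]
        | none => acc) acc),
       pvX? (messages.foldl (fun acc msg =>
        match pvTsA msg with
        | some v => acc ++ [v]
        | none => acc) acc)) := by
  induction messages generalizing acc with
  | nil => simp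
  | cons m rest ih =>
    simp only [List.foldl_cons]
    have hts : pvTsB m = pvTsA m := by
      unfold pvTsB pvTsA
      cases (PySem.Dict.mk m).get? "createdAt" with
      | none => simp
      | some v => by_cases hv : v = 0 <;> simp [hv]
    cases h : pvTsA m with
    | none => simp [hts, h]; exact ih acc
    | some v =>
      simp only [hts, h, Option.elim_some]
      have heq : ((pvM? acc).elim (some v) (fun l => some (if v < l then v else l)),
               (pvX? acc).elim (some v) (fun h => some (if v > h then v else h)))
            = (pvM? (acc ++ [v]), pvX? (acc ++ [v])) := by
        rw [pvM?_snoc, pvX?_snoc]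
      rw [heq]
      exact ih (acc ++ [v])

-- ===== VERDICT (by name: the statement is the Claim_ definition above) =====
theorem extract_time_bounds_py_spec : Claim_equal_extract_time_bounds_py := by
  intro messages _
  unfold Spec_extract_time_bounds_py extract_time_bounds_py extract_time_bounds_py_alt
  have h := pv_fold_inv messages []
  simp only [pvM?, pvX?] at h
  rw [h]
  cases htimes : messages.foldl (fun acc msg =>
      match pvTsA msg with
      | some v => acc ++ [v]
      | none => acc) [] with
  | nil => simp
  | cons x t =>
    simp [PySem.List.min?_id_cons, PySem.List.max?_id_cons]
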